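/-
  PART 1 OF `start_decoder` AFTER THE IDENTIFICATION HEADER (segments .5 – .9: the comment header and the start of the setup header),
  THE CARRY LAYER OVER `Real.SD … 2` / `Frame` (namespace `Vorbis.Spec.StartDecoder.P1`). `StartDecoder2.lean` (`P2`) is the same layer for
  segment .2 over `P2.Inv`; this file is the one for the points whose invariant is the weak / full program point `SD 2`
  (segment .9 and its children, `StartDecoder9.lean`). Everything here is about MEMORY: no machine step.

      P1.OKWin, P1.sd2_carry        `Real.SD … 2` (and CM1 – CM3 over the arena's own blocks) over a batch of stores into windows that a
                                    part-1 callee may write: the readers' / `error`'s windows of `*f`, anything off `*f`, off the compiler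
                                    constants `[R + 8, R + 28H)`, off the arena's buffer. `Bits` of the new memory is a hypothesis (the
                                    readers' posts chain it; `P1.bits_miss`, `P1.bits_off` for the other stores).
      P1.FrameWin, P1.frame_carry   the common part `Frame` at another pc of the same segment for the SAME ghost arena: FOUR arms — the own
                                    stack below the saved registers (off the shadow-index slot), `*f` (two placements), `crc_table`.
      P1.FrameWin2, P1.frame_carry2 `Frame` for ANY ghost arena `A'` that `g.A0` extends to (the same one, or the grown one after a successful
                                    allocation): `FrameWin` + THE HEAP ARM — a window inside the arena's buffer `[A0.B, A0.B + A0.L)` (stores into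
                                    heap blocks: vendor / comment string bytes, the memset of a new block; the arm `P2.FrameWin` lacks) — + the
                                    arena's shadow; the shadow layer of `A'` is given as `ShadowInv A'.2 …` (`h.shadow.untouched hun` for the same
                                    arena, the allocator's post for a grown one) instead of `ShadowUntouched`.
      P1.layout_facts               where `*f`, `R`, the arena's buffer, `log2_4`, `crc_table` are: 14 inequalities for `omega`, from
                                    `Frame` + `Hand` + `SD k` (any k).
      P1.Wmax, P1.wmax_ok           the literal window list of a path of segment .9 before the allocation; all its windows are allowed.
      P1.LateWin, P1.late_parts     what survives of `SD 2` after the store of `codebook_count` (neither `SDw 2` nor `SDw 3` holds there).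
      P1.failed_null                `Failed` (SD.ERR) with `codebook_count` stored and `codebooks = NULL` (exit 4 of segment .9).
      P1.header_obj                 the frame object `header` (6 bytes at `[R + A0H]`) is a live stack object.
      P1.counter_* / cnt_toNat / sz_toNat / rdx_toNat   the 32-bit counters of loop 3737 and of `2120 · count` as numbers (by `decide`).

  FROM the farm's worker of unit start_decoder.9 (attempt 1: every lemma here compiled there); moved, not re-derived.
-/
import Asan.CheckWalk
import Vorbis.Spec.Alloc
import Vorbis.Spec.Leaves
import Vorbis.Spec.Libc
import Vorbis.Spec.Reader
import Vorbis.Spec.StartDecoderA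
import Vorbis.Spec.StartDecoderATest

open X86 X86.User Asan Vorbis Vorbis.Spec

set_option maxRecDepth 4000
set_option maxHeartbeats 4000000

namespace Vorbis.Spec.StartDecoder
namespace P1

/-- The windows of `*f` that no callee of part 1 except the allocator writes: everything but `stream` `[48,56)`, `p_first`
`[84,96)`, `eof` + `error` `[136,144)` and the paging / bit-reader fields `[1484,1749)`, `[1752,1784)`. -/
def sd2KeptWins : Wins := [(0, 48), (56, 84), (96, 136), (144, 1484), (1749, 1752), (1784, 1808)]

/-- **A window a part-1 callee may write** without disturbing `SD 2`: inside a reader / error window of `*f` or off `*f`; off the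
compiler constants `[R + 8, R + 28H)`; off the arena's buffer (where the comment blocks are). -/
def OKWin (Ar : Arena) (f R : Nat) (w : Span) : Prop :=
  (w.hi ≤ f ∨ f + 1808 ≤ w.lo ∨ (f + 48 ≤ w.lo ∧ w.hi ≤ f + 56) ∨ (f + 84 ≤ w.lo ∧ w.hi ≤ f + 96) ∨
    (f + 136 ≤ w.lo ∧ w.hi ≤ f + 144) ∨ (f + 1484 ≤ w.lo ∧ w.hi ≤ f + 1749) ∨ (f + 1752 ≤ w.lo ∧ w.hi ≤ f + 1784)) ∧
  (w.hi ≤ R + 8 ∨ R + 0x28 ≤ w.lo) ∧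
  (w.hi ≤ Ar.B ∨ Ar.B + Ar.L ≤ w.lo)

/-- The kept windows of `*f` read the same after stores into allowed windows. -/
theorem objEq_kept {Ar : Arena} {mem mem' : Mem} {f R : Nat} {ws : List Span} (hs : Mem.SameExcept ws mem mem')
    (hf : f + 1808 ≤ 2 ^ 64) (hw : ∀ w, w ∈ ws → OKWin Ar f R w) : ObjEq sd2KeptWins mem f mem' f := by
  apply ObjEq.of_sameExcept hs
  · intro w' hw'
    simp only [sd2KeptWins, List.mem_cons, List.mem_nil_iff, or_false] at hw'
    rcases hw' with rfl | rfl | rfl | rfl | rfl | rfl <;> simp only [] <;> omega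
  · intro w' hw' s hsp
    have h1 := (hw s hsp).1
    simp only [sd2KeptWins, List.mem_cons, List.mem_nil_iff, or_false] at hw'
    rcases hw' with rfl | rfl | rfl | rfl | rfl | rfl <;> simp only [] <;> omega

/-- **CM1 – CM3 over the arena's own blocks, carried over stores into allowed windows** (the comment blocks lie in the arena's
buffer, which no allowed window meets). -/
theorem comments_carry {A : Arena × List Obj} {Blk : Block → Prop} {mem mem' : Mem} {f R : Nat} {ws : List Span}
    (harena : ArenaOK A.1 A.2 mem f) (hown : CommentsOK A.1.Blk mem f) (hc : CommentsOK Blk mem f)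
    (hs : Mem.SameExcept ws mem mem') (hf : f + 1808 ≤ 2 ^ 64) (hw : ∀ w, w ∈ ws → OKWin A.1 f R w) :
    CommentsOK Blk mem' f := by
  have he := objEq_kept hs hf hw
  refine hc.transfer (he.sub (by decide)) ?_ (fun _ _ hb => hb)
  intro B hR
  have hin := arena_inside harena (hown.reads_blk hR)
  have hb := harena.bounds
  refine Block.Kept.of_sameExcept hs ?_ (by omega)
  intro w hw'
  have h3 := (hw w hw').2.2
  omega

/-- **`SD 2` carried over a batch of stores into allowed windows** (the footprints of start_packet, get8_packet, get_bits,
crc32_init, error, vorbis_validate and the segment's own spills and `header[i]` stores), given `Bits` in the new memory (the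
readers' posts chain it) and no store to the shadow. `hown`: CM1 – CM3 over the arena's own blocks (`Body9.own`). -/
theorem sd2_carry {len : Nat} {A : Arena × List Obj} {Blk : Block → Prop} {Live : Nat → Prop} {mem mem' : Mem} {f R : Nat}
    {ws : List Span} (h : Real.SD len 2 A Blk Live mem f R) (hown : CommentsOK A.1.Blk mem f)
    (hs : Mem.SameExcept ws mem mem') (hun : ShadowUntouched mem mem') (hb : Bits Blk len mem' f)
    (hf : f + 1808 ≤ 2 ^ 64) (hR : R + 0x28 ≤ 2 ^ 64) (hw : ∀ w, w ∈ ws → OKWin A.1 f R w) :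
    Real.SD len 2 A Blk Live mem' f R ∧ CommentsOK A.1.Blk mem' f := by
  have he := objEq_kept hs hf hw
  have harena : ArenaOK A.1 A.2 mem f := h.arena
  have hcm := comments_carry harena hown (h.comment (by omega)) hs hf hw
  have hcm' := comments_carry harena hown hown hs hf hw
  refine ⟨?_, hcm'⟩
  refine SDw.toSD (k := 2) ?_ (by omega) h.noTemps (fun h1 => absurd h1 (by omega)) (fun _ => hcm)
  refine
    { env := h.env.eqOn hun
      frame := ?_
      arena := harena.transfer (he.sub (by decide))
      setups := h.setups
      bits := hb
      first := ?_
      discard0 := ?_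
      header := fun h1 => HeaderOK.transfer (h.header h1) (he.sub (by decide))
      cb0 := fun h3 => absurd h3 (by omega)
      rest := ?_ }
  · -- the compiler constants ONE20 / Z10 / Z24 and the shadow index
    refine h.frame.frame ?_ hR
    apply hs.eqOn
    intro w hw'
    have h2 := (hw w hw').2.1
    omega
  · -- first_decode
    have e := h.first
    simp only [vacc, voff] at e ⊢
    rw [he.u8 1749 (by decide)]
    exact e
  · -- discard_samples_deferred
    have e := h.discard0
    simp only [vacc, voff] at e ⊢
    rw [he.i32 1784 (by decide)]
    exact e
  · -- the zero rest
    have hr : RestZero mem f (restFrom 2) := h.rest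
    unfold RestZero at hr ⊢
    have e2 : restFrom 2 = 160 := by
      unfold restFrom
      simp only [voff]
      decide
    rw [e2] at hr ⊢
    simp only [voff] at hr ⊢
    refine hr.frame ?_ (by omega)
    apply hs.eqOn
    intro w hw'
    have h1 := (hw w hw').1
    omega

/-- **A window a segment of part 1 may write without disturbing the common part `Frame`** (besides the shadow, which is a
hypothesis of its own): inside the function's footprint — the stack below the saved registers, `*f`, `crc_table` — and off the
shadow-index slot `[R + 8, R + 10H)`. -/
def FrameWin (g : Ghost) (w : Span) : Prop :=
  ((g.RA - depth ≤ w.lo ∧ w.hi ≤ g.R + 0x598 ∧ (w.hi ≤ g.R + 8 ∨ g.R + 16 ≤ w.lo)) ∨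
    (g.f ≤ w.lo ∧ w.hi ≤ g.f + 1808 ∧ g.RA + 8 ≤ g.f) ∨
    (g.f ≤ w.lo ∧ w.hi ≤ g.f + 1808 ∧ (g.f + 1808 ≤ 0x700000 ∨ 0x800000 ≤ g.f) ∧
      (g.f + 1808 ≤ 0x120640 ∨ 0x120650 ≤ g.f)) ∨
    (0x121c00 ≤ w.lo ∧ w.hi ≤ 0x121c00 + 1024))

/-- **The common part `Frame` at another point of the same segment**: the memory differs from the one at `v` only inside
`FrameWin` windows, no shadow byte was written, the ghost arena is the same. rip, rsp, the code and the ABI invariant of the new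
state are given. -/
theorem frame_carry {u₀ : State} {g : Ghost} {pc pc' : Word} {A : Arena × List Obj} {v s : State} {ws : List Span}
    (h : Frame u₀ g pc A v) (hs : Mem.SameExcept ws v.mem s.mem) (hun : ShadowUntouched v.mem s.mem)
    (hrip : s.rip = pc') (hrsp : s.reg .rsp = addr g.R) (hcode : CodeOK u₀ s.mem) (hinv : abiInv s)
    (hw : ∀ w, w ∈ ws → FrameWin g w) : Frame u₀ g pc' A s := by
  obtain ⟨hRA, hR8⟩ := h.r_eq
  obtain ⟨_, hroom, htop⟩ := h.ra
  simp only [depth, steady] at hRA hroom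
  -- a slot of the own frame above the spills reads the same
  have hslot : ∀ off : Nat, (off = 8 ∨ 0x598 ≤ off) → off + 8 ≤ 0x5d0 → s.mem.u64 (g.R + off) = v.mem.u64 (g.R + off) := by
    intro off ho1 ho2
    unfold Mem.u64
    have e : (addr (g.R + off)).toNat = g.R + off := toNat_addr _ (by omega)
    apply hs.readLE _ _ (by omega)
    intro w hw'
    rw [e]
    have := hw w hw'
    unfold FrameWin at this
    simp only [depth] at this
    omega
  refine
    { entry := h.entry
      rip := hrip
      rsp := hrsp
      shadowIdx := by rw [hslot 8 (Or.inl rfl) (by omega)]; exact h.shadowIdx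
      saved_rbx := by rw [hslot 0x598 (Or.inr (by omega)) (by omega)]; exact h.saved_rbx
      saved_rbp := by rw [hslot 0x5a0 (Or.inr (by omega)) (by omega)]; exact h.saved_rbp
      saved_r12 := by rw [hslot 0x5a8 (Or.inr (by omega)) (by omega)]; exact h.saved_r12
      saved_r13 := by rw [hslot 0x5b0 (Or.inr (by omega)) (by omega)]; exact h.saved_r13
      saved_r14 := by rw [hslot 0x5b8 (Or.inr (by omega)) (by omega)]; exact h.saved_r14
      saved_r15 := by rw [hslot 0x5c0 (Or.inr (by omega)) (by omega)]; exact h.saved_r15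
      saved_ra := by rw [hslot 0x5c8 (Or.inr (by omega)) (by omega)]; exact h.saved_ra
      code := hcode
      inv := hinv
      shadow := h.shadow.untouched hun
      offText := h.offText
      ext := h.ext
      callers := h.callers
      sh7 := ?_
      same := ?_ }
  · -- SH7 for `log2_4`: the table lies in the image, below every allowed window
    intro i hi
    have e : (UInt64.ofNat (Vorbis.Globals.log2_4.beg + i)).toNat = 0x120640 + i := by
      have e0 : Vorbis.Globals.log2_4.beg = 0x120640 := rfl
      rw [e0]
      exact toNat_addr _ (by omega)
    rw [← h.sh7 i hi]
    apply hs.readLE _ _ (by omega)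
    intro w hw'
    rw [e]
    have := hw w hw'
    unfold FrameWin at this
    simp only [depth] at this
    omega
  · -- the function's footprint
    refine h.same.step_same hs ?_
    intro w hw' a h1 h2
    have hk := hw w hw'
    unfold FrameWin at hk
    unfold StartDecoder.footprint writes
    have eRA : g.RA = (g.e.reg .rsp).toNat := rfl
    have ef : g.f = (g.e.reg .rdi).toNat := rfl
    rcases hk with hk | hk | hk | hk
    · refine ⟨_, List.mem_cons_self, ?_, ?_⟩
      · simp only []
        omega
      · simp only []
        omega
    · refine ⟨_, List.mem_cons_of_mem _ List.mem_cons_self, ?_, ?_⟩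
      · simp only [vblock, voff]
        omega
      · simp only [vblock, voff]
        omega
    · refine ⟨_, List.mem_cons_of_mem _ List.mem_cons_self, ?_, ?_⟩
      · simp only [vblock, voff]
        omega
      · simp only [vblock, voff]
        omega
    · refine ⟨_, List.mem_cons_of_mem _ (List.mem_cons_of_mem _ List.mem_cons_self), ?_, ?_⟩
      · simp only []
        omega
      · simp only []
        omega

/-- **Where everything is**, as one arithmetic fact for `omega` (what the window conditions `OKWin` / `FrameWin` of the exits are
proved from): the steady stack pointer, `*f` (a stack object of a CALLER's frame, or off the stack; apart from the globals
`log2_4` and `crc_table`; outside the arena's buffer), the arena's buffer (off the stack, off `crc_table`). -/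
theorem layout_facts {u₀ : State} {g : Ghost} {pc : Word} {A : Arena × List Obj} {v : State} {k : Nat}
    (hfr : Frame u₀ g pc A v) (hh : g.Hand A) (hsd : Real.SD g.len k A (g.Blk A) (g.Live A) v.mem g.f g.R) :
    g.R + 1480 = g.RA ∧ g.R % 8 = 0 ∧ 0x700000 + 1888 ≤ g.RA ∧ g.RA + 8 ≤ 0x800000 ∧
    (g.RA + 8 ≤ g.f ∨ g.f + 1808 ≤ 0x700000 ∨ 0x800000 ≤ g.f) ∧ 0x119d40 ≤ g.f ∧ g.f + 1808 ≤ 0xC00000 ∧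
    (g.f + 1808 ≤ 0x120640 ∨ 0x120650 ≤ g.f) ∧ (g.f + 1808 ≤ 0x121c00 ∨ 0x122000 ≤ g.f) ∧
    (g.f + 1808 ≤ A.1.B ∨ A.1.B + A.1.L ≤ g.f) ∧
    (A.1.B + A.1.L ≤ 0x700000 ∨ 0x800000 ≤ A.1.B) ∧ (0x122000 ≤ A.1.B ∨ A.1.B + A.1.L ≤ 0x121c00) ∧
    A.1.B + A.1.L ≤ 0xC00000 ∧ 0x100000 ≤ A.1.B := by
  obtain ⟨hRA, hR8⟩ := hfr.r_eq
  obtain ⟨hra8, hroom, htop⟩ := hfr.ra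
  simp only [depth, steady] at hRA hroom
  have harena : ArenaOK A.1 A.2 v.mem g.f := hsd.arena
  have h1 := harena.AR1
  have h1x := harena.AR1x
  have hobjOut := hh.objOut
  simp only [voff] at hobjOut
  -- `*f` in the data space
  have hwf := (hh.obj.mono (sub_frames' g A)).where_ hfr.shadow hfr.offText (by decide)
  simp only [voff] at hwf
  -- `*f` against the own stack frame
  have hstack : g.RA + 8 ≤ g.f ∨ g.f + 1808 ≤ 0x700000 ∨ 0x800000 ≤ g.f := by
    obtain ⟨o, ho, k1, k2⟩ := hh.obj
    simp only [voff] at k2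
    rcases List.mem_append.mp ho with hs | hoth
    · left
      unfold stackObjs at hs
      obtain ⟨bF, hbF, hin⟩ := List.mem_flatMap.mp hs
      have hmem : bF ∈ g.frames' := List.mem_cons_of_mem _ hbF
      obtain ⟨a1, a2, _, _, _⟩ := hfr.shadow.stack.active bF hmem
      have hg := FrameLayout.objsAt_gran a1 a2 hin
      have e1 : o.gLo = o.base / 8 := rfl
      have hc := hfr.callers bF hbF
      omega
    · right
      have hoff := hfr.shadow.off o hoth
      unfold OffStack at hoff
      omega
  -- `*f` against the two globals: allocated blocks of different sizes are disjoint
  have hok : BlkOK (g.Blk A) := hsd.env.ok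
  have hbf : g.Blk A (objBlock g.f) := (Bits.ob1 hsd.bits).blk
  have hlog : g.Blk A ⟨0x120640, 16⟩ := by
    apply runBlk_extra
    simp only [fixedBlocks, globalBlocks, List.mem_cons, true_or, or_true]
  have hcrc : g.Blk A ⟨0x121c00, 1024⟩ := by
    apply runBlk_extra
    simp only [fixedBlocks, globalBlocks, List.mem_cons, true_or, or_true]
  have hd1 : g.f + 1808 ≤ 0x120640 ∨ 0x120650 ≤ g.f := by
    rcases hok.apart _ _ hbf hlog with e | hd
    · have e2 := congrArg Block.size e
      simp only [vblock, voff] at e2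
      omega
    · simp only [vblock, voff] at hd
      omega
  have hd2 : g.f + 1808 ≤ 0x121c00 ∨ 0x122000 ≤ g.f := by
    rcases hok.apart _ _ hbf hcrc with e | hd
    · have e2 := congrArg Block.size e
      simp only [vblock, voff] at e2
      omega
    · simp only [vblock, voff] at hd
      omega
  -- the arena against `crc_table`
  have hout := hh.outside ⟨0x121c00, 1024⟩ (by simp only [fixedBlocks, globalBlocks, List.mem_cons, true_or, or_true])
  simp only [] at hout
  have eRA : g.RA = (g.e.reg .rsp).toNat := rfl
  omega

/-- **The windows a path of segment `.9` writes before the allocation** (a literal list in `RA`, `f`: what `u_same` proves of the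
walker's memory): the stack below the steady stack pointer (return addresses, the callees' frames), the frame object `header`
`[R + A0H, R + A6H)`, the readers' and `error`'s windows of `*f`, `crc_table`. -/
def Wmax (RA f : Nat) : List Span :=
  [⟨RA - 1888, RA - 1480⟩, ⟨RA - 1320, RA - 1314⟩,
   ⟨f + 48, f + 56⟩, ⟨f + 84, f + 96⟩, ⟨f + 136, f + 144⟩, ⟨f + 1484, f + 1749⟩, ⟨f + 1752, f + 1784⟩,
   ⟨0x121c00, 0x121c00 + 1024⟩]

/-- Every window of `Wmax` is allowed for `SD 2` and for `Frame`. -/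
theorem wmax_ok {u₀ : State} {g : Ghost} {pc : Word} {A : Arena × List Obj} {v : State} {k : Nat}
    (hfr : Frame u₀ g pc A v) (hh : g.Hand A) (hsd : Real.SD g.len k A (g.Blk A) (g.Live A) v.mem g.f g.R) :
    ∀ w, w ∈ Wmax g.RA g.f → OKWin A.1 g.f g.R w ∧ FrameWin g w := by
  obtain ⟨hRA, hR8, hroom, htop, hfstack, hflo, hfhi, hflog, hfcrc, hfout, hAstack, hAcrc, hAhi, hAlo⟩ :=
    layout_facts hfr hh hsd
  intro w hw
  unfold Wmax at hw
  simp only [List.mem_cons, List.mem_nil_iff, or_false] at hw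
  unfold OKWin FrameWin
  simp only [depth]
  rcases hw with rfl | rfl | rfl | rfl | rfl | rfl | rfl | rfl
  all_goals simp only []
  all_goals omega

/-- **`Bits` over stores that miss the four windows `Bits` reads** (`error`'s `[f+140, f+144)`, the allocator's `[f+8, f+12)` and
`[f+128, f+132)`, `codebook_count`, `codebooks`, anything off `*f`). -/
theorem bits_miss {Blk : Block → Prop} {len : Nat} {mem mem' : Mem} {f : Nat} {ws : List Span} (h : Bits Blk len mem f)
    (hs : Mem.SameExcept ws mem mem')
    (hoff : ∀ w, w ∈ ws → w.hi ≤ f + 48 ∨ (f + 72 ≤ w.lo ∧ w.hi ≤ f + 1488) ∨ f + 1772 ≤ w.lo) : Bits Blk len mem' f := by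
  apply h.frame_fields
  apply Bits.SameFields.of_sameExcept hs
  all_goals
    intro w hw
    have := hoff w hw
    omega

/-- **The frame object `header`** (6 bytes at `[R + A0H]` = base + 80 of `Frames.start_decoder`) is a live object inside the
function: the object of the store check 0x1141e6 and of `vorbis_validate`'s precondition. -/
theorem header_obj (g : Ghost) (A : Arena × List Obj) :
    (⟨g.base + 80, 6, .stack⟩ : Obj) ∈ stackObjs g.frames' ++ A.2 := by
  apply List.mem_append_left
  unfold Ghost.frames'
  rw [stackObjs_cons]
  apply List.mem_append_left
  unfold FrameLayout.objsAt
  apply List.mem_map.mpr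
  refine ⟨⟨"header", 80, 6⟩, ?_, rfl⟩
  simp only [Vorbis.Frames.start_decoder, List.mem_cons, true_or, or_true]

/-- The loop counter of loop 3737 as a signed 32-bit number. -/
theorem counter_toInt : ∀ k, k ≤ 6 → (Word.part .w32 (UInt64.ofNat k)).toInt = (k : Int) := by
  decide

/-- `movsxd r12, r13d` of the loop counter. -/
theorem counter_sext : ∀ k, k ≤ 6 →
    Word.ofBV (BitVec.signExtend 64 (Word.part .w32 (UInt64.ofNat k))) = UInt64.ofNat k := by
  decide

/-- `add r13d, 1` of the loop counter. -/
theorem counter_succ : ∀ k, k ≤ 5 → Word.ofBV (Word.part .w32 (UInt64.ofNat k) + 1#32) = UInt64.ofNat (k + 1) := by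
  decide

set_option maxRecDepth 100000 in
/-- `lea r13d, [rax + 1]` for `rax = get_bits(f, 8) < 256`: the codebook count. -/
theorem cnt_toNat : ∀ k, k < 256 → (BitVec.setWidth 32 (UInt64.ofNat k + 1).toBitVec).toNat = k + 1 := by
  decide

set_option maxRecDepth 100000 in
/-- `imul esi, r13d, 0x848`: the size of the codebooks block, `2120 · count ≤ 542720` (no 32-bit overflow). -/
theorem sz_toNat : ∀ k, k < 256 →
    (Word.ofBV (BitVec.setWidth 32 (UInt64.ofNat k + 1).toBitVec * 2120#32)).toNat = 2120 * (k + 1) := by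
  decide

set_option maxRecDepth 100000 in
/-- `movsxd rdx, [f->codebook_count] ; imul rdx, rdx, 0x848`: the length of the memset, `2120 · count`. -/
theorem rdx_toNat : ∀ k, k < 256 →
    (Word.ofBV (BitVec.signExtend 64 (BitVec.ofNat 32 (k + 1))) * 2120).toNat = 2120 * (k + 1) := by
  decide

/-- **`Bits` over stores that all lie off `*f`** (a return address, the frame of `crc32_init` and its `crc_table`, the frame of
`vorbis_validate`): any list of windows (`Reader.bits_of_window` is the one-window case). -/
theorem bits_off {Blk : Block → Prop} {len : Nat} {mem mem' : Mem} {f : Nat} {ws : List Span} (h : Bits Blk len mem f)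
    (hs : Mem.SameExcept ws mem mem') (hoff : ∀ w, w ∈ ws → w.hi ≤ f ∨ f + 1808 ≤ w.lo) : Bits Blk len mem' f := by
  apply h.frame_fields
  apply Bits.SameFields.of_sameExcept hs
  all_goals
    intro w hw
    have := hoff w hw
    omega

/-- **A window the last part of segment `.9` may write** (after the store of `codebook_count`) without disturbing what survives
of `SD 2`: off `*f` or inside `setup_memory_required` `[8,12)`, `setup_offset` `[128,132)`, `eof` + `error` `[136,144)`,
`codebook_count` … `codebooks` `[160,176)`; off the compiler constants; off the USED part `[B, B + S)` of the arena (where the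
comment blocks are: the new block and the shadow lie above it). -/
def LateWin (Ar : Arena) (f R : Nat) (w : Span) : Prop :=
  (w.hi ≤ f ∨ f + 1808 ≤ w.lo ∨ (f + 8 ≤ w.lo ∧ w.hi ≤ f + 12) ∨ (f + 128 ≤ w.lo ∧ w.hi ≤ f + 132) ∨
    (f + 136 ≤ w.lo ∧ w.hi ≤ f + 144) ∨ (f + 160 ≤ w.lo ∧ w.hi ≤ f + 176)) ∧
  (w.hi ≤ R + 8 ∨ R + 0x28 ≤ w.lo) ∧
  (w.hi ≤ Ar.B ∨ Ar.B + Ar.S ≤ w.lo)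

/-- The windows of `*f` that the last part of the segment keeps (the arena fields `[112,136)` are NOT among them: the allocator
stores `setup_offset`; `ArenaOK` comes from its postcondition). -/
def lateKeptWins : Wins := [(0, 8), (12, 128), (144, 160), (176, 1808)]

/-- **What survives of `SD 2` over the last part of segment `.9`**: the constants, `Bits`, `first_decode`,
`discard_samples_deferred`, HD1 – HD3, CM1 – CM3 (over both block predicates), the zero rest from `floor_count` on. -/
theorem late_parts {len : Nat} {A : Arena × List Obj} {Blk : Block → Prop} {Live : Nat → Prop} {mem mem' : Mem} {f R : Nat}
    {ws : List Span} (h : Real.SD len 2 A Blk Live mem f R) (hown : CommentsOK A.1.Blk mem f)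
    (hs : Mem.SameExcept ws mem mem') (hf : f + 1808 ≤ 2 ^ 64) (hR : R + 0x28 ≤ 2 ^ 64)
    (hw : ∀ w, w ∈ ws → LateWin A.1 f R w) :
    SDFrameConsts 2 mem' R ∧ Bits Blk len mem' f ∧ stb_vorbis.first_decode mem' f = 1 ∧
      stb_vorbis.discard_samples_deferred mem' f = 0 ∧ HeaderOK mem' f ∧ CommentsOK Blk mem' f ∧
      CommentsOK A.1.Blk mem' f ∧ RestZero mem' f Off.stb_vorbis.floor_count := by
  have harena : ArenaOK A.1 A.2 mem f := h.arena
  have he : ObjEq lateKeptWins mem f mem' f := by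
    apply ObjEq.of_sameExcept hs
    · intro w' hw'
      simp only [lateKeptWins, List.mem_cons, List.mem_nil_iff, or_false] at hw'
      rcases hw' with rfl | rfl | rfl | rfl <;> simp only [] <;> omega
    · intro w' hw' s hsp
      have h1 := (hw s hsp).1
      simp only [lateKeptWins, List.mem_cons, List.mem_nil_iff, or_false] at hw'
      rcases hw' with rfl | rfl | rfl | rfl <;> simp only [] <;> omega
  have hkept : ∀ B, CommentsOK.Reads mem f B → B.Kept mem mem' := by
    intro B hR'
    have hB : A.1.Block B.base B.size := hown.reads_blk hR'
    have hr := harena.block_range hB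
    have hl := le_r8 B.size
    have hb := harena.bounds
    refine Block.Kept.of_sameExcept hs ?_ (by omega)
    intro w hw'
    have h3 := (hw w hw').2.2
    omega
  refine ⟨?_, ?_, ?_, ?_, ?_, ?_, ?_, ?_⟩
  · refine h.frame.frame ?_ hR
    apply hs.eqOn
    intro w hw'
    have h2 := (hw w hw').2.1
    omega
  · refine bits_miss h.bits hs ?_
    intro w hw'
    have h1 := (hw w hw').1
    omega
  · have e := h.first
    simp only [vacc, voff] at e ⊢
    rw [he.u8 1749 (by decide)]
    exact e
  · have e := h.discard0
    simp only [vacc, voff] at e ⊢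
    rw [he.i32 1784 (by decide)]
    exact e
  · exact HeaderOK.transfer (h.header (by omega)) (he.sub (by decide))
  · exact (h.comment (by omega)).transfer (he.sub (by decide)) hkept (fun _ _ hb => hb)
  · exact hown.transfer (he.sub (by decide)) hkept (fun _ _ hb => hb)
  · have hr : RestZero mem f (restFrom 2) := h.rest
    unfold RestZero at hr ⊢
    have e2 : restFrom 2 = 160 := by
      unfold restFrom
      simp only [voff]
      decide
    rw [e2] at hr
    simp only [voff] at hr ⊢
    refine (hr.mono (by omega) (Nat.le_refl _)).frame ?_ (by omega)
    apply hs.eqOn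
    intro w hw'
    have h1 := (hw w hw').1
    omega

/-- **A window the whole of segment `.9` may write without disturbing the memory-level fields of `Frame`**: `FrameWin`, or inside
the arena's buffer, or inside the arena's shadow (both in the function's footprint; both off the stack and off `log2_4`). -/
def FrameWin2 (g : Ghost) (w : Span) : Prop :=
  FrameWin g w ∨
  (g.A0.1.B ≤ w.lo ∧ w.hi ≤ g.A0.1.B + g.A0.1.L ∧ (g.A0.1.B + g.A0.1.L ≤ 0x700000 ∨ 0x800000 ≤ g.A0.1.B) ∧
    (g.A0.1.B + g.A0.1.L ≤ 0x120640 ∨ 0x120650 ≤ g.A0.1.B)) ∨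
  (0xC00000 + g.A0.1.B / 8 ≤ w.lo ∧ w.hi ≤ 0xC00000 + (g.A0.1.B + g.A0.1.L + 7) / 8)

/-- **The common part `Frame` at a later point, for ANOTHER ghost arena / object list** (after `setup_malloc`): the shadow layer,
`offText` and AR7 of the new ghost are given; the memory-level fields are carried over `FrameWin2` windows. -/
theorem frame_carry2 {u₀ : State} {g : Ghost} {pc pc' : Word} {A A' : Arena × List Obj} {v s : State} {ws : List Span}
    (h : Frame u₀ g pc A v) (hs : Mem.SameExcept ws v.mem s.mem)
    (hshadow : ShadowInv A'.2 g.frames' g.R s.mem) (hoff : ∀ o, o ∈ A'.2 → L.textHi ≤ o.base)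
    (hext : g.A0.1.Extends A'.1)
    (hrip : s.rip = pc') (hrsp : s.reg .rsp = addr g.R) (hcode : CodeOK u₀ s.mem) (hinv : abiInv s)
    (hw : ∀ w, w ∈ ws → FrameWin2 g w) : Frame u₀ g pc' A' s := by
  obtain ⟨hRA, hR8⟩ := h.r_eq
  obtain ⟨_, hroom, htop⟩ := h.ra
  simp only [depth, steady] at hRA hroom
  have hslot : ∀ off : Nat, (off = 8 ∨ 0x598 ≤ off) → off + 8 ≤ 0x5d0 → s.mem.u64 (g.R + off) = v.mem.u64 (g.R + off) := by
    intro off ho1 ho2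
    unfold Mem.u64
    have e : (addr (g.R + off)).toNat = g.R + off := toNat_addr _ (by omega)
    apply hs.readLE _ _ (by omega)
    intro w hw'
    rw [e]
    have := hw w hw'
    unfold FrameWin2 FrameWin at this
    simp only [depth] at this
    omega
  refine
    { entry := h.entry
      rip := hrip
      rsp := hrsp
      shadowIdx := by rw [hslot 8 (Or.inl rfl) (by omega)]; exact h.shadowIdx
      saved_rbx := by rw [hslot 0x598 (Or.inr (by omega)) (by omega)]; exact h.saved_rbx
      saved_rbp := by rw [hslot 0x5a0 (Or.inr (by omega)) (by omega)]; exact h.saved_rbp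
      saved_r12 := by rw [hslot 0x5a8 (Or.inr (by omega)) (by omega)]; exact h.saved_r12
      saved_r13 := by rw [hslot 0x5b0 (Or.inr (by omega)) (by omega)]; exact h.saved_r13
      saved_r14 := by rw [hslot 0x5b8 (Or.inr (by omega)) (by omega)]; exact h.saved_r14
      saved_r15 := by rw [hslot 0x5c0 (Or.inr (by omega)) (by omega)]; exact h.saved_r15
      saved_ra := by rw [hslot 0x5c8 (Or.inr (by omega)) (by omega)]; exact h.saved_ra
      code := hcode
      inv := hinv
      shadow := hshadow
      offText := hoff
      ext := hext
      callers := h.callers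
      sh7 := ?_
      same := ?_ }
  · intro i hi
    have e : (UInt64.ofNat (Vorbis.Globals.log2_4.beg + i)).toNat = 0x120640 + i := by
      have e0 : Vorbis.Globals.log2_4.beg = 0x120640 := rfl
      rw [e0]
      exact toNat_addr _ (by omega)
    rw [← h.sh7 i hi]
    apply hs.readLE _ _ (by omega)
    intro w hw'
    rw [e]
    have := hw w hw'
    unfold FrameWin2 FrameWin at this
    simp only [depth] at this
    omega
  · refine h.same.step_same hs ?_
    intro w hw' a h1 h2
    have hk := hw w hw'
    unfold FrameWin2 FrameWin at hk
    unfold StartDecoder.footprint writes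
    have eRA : g.RA = (g.e.reg .rsp).toNat := rfl
    have ef : g.f = (g.e.reg .rdi).toNat := rfl
    rcases hk with (hk | hk | hk | hk) | hk | hk
    · refine ⟨_, List.mem_cons_self, ?_, ?_⟩
      · simp only []
        omega
      · simp only []
        omega
    · refine ⟨_, List.mem_cons_of_mem _ List.mem_cons_self, ?_, ?_⟩
      · simp only [vblock, voff]
        omega
      · simp only [vblock, voff]
        omega
    · refine ⟨_, List.mem_cons_of_mem _ List.mem_cons_self, ?_, ?_⟩
      · simp only [vblock, voff]
        omega
      · simp only [vblock, voff]
        omega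
    · refine ⟨_, List.mem_cons_of_mem _ (List.mem_cons_of_mem _ List.mem_cons_self), ?_, ?_⟩
      · simp only []
        omega
      · simp only []
        omega
    · refine ⟨_, List.mem_cons_of_mem _ (List.mem_cons_of_mem _ (List.mem_cons_of_mem _ List.mem_cons_self)), ?_, ?_⟩
      · simp only []
        omega
      · simp only []
        omega
    · refine ⟨_, List.mem_cons_of_mem _ (List.mem_cons_of_mem _ (List.mem_cons_of_mem _
        (List.mem_cons_of_mem _ List.mem_cons_self))), ?_, ?_⟩
      · simp only [shadowSpan]
        omega
      · simp only [shadowSpan]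
        omega

/-- A window of a footprint on which the two memories are known to agree can be dropped (the shadow window of a failed
`setup_malloc`: its postcondition says the shadow is untouched). -/
theorem sameExcept_drop_last {ws : List Span} {w : Span} {m m' : Mem} (h : Mem.SameExcept (ws ++ [w]) m m')
    (he : Mem.EqOn w.lo w.hi m m') : Mem.SameExcept ws m m' := by
  intro a ha
  by_cases hin : a.toNat < w.lo ∨ w.hi ≤ a.toNat
  · apply h a
    intro w' hw'
    rcases List.mem_append.mp hw' with h1 | h1
    · exact ha w' h1
    · have e : w' = w := List.mem_singleton.mp h1
      rw [e]
      exact hin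
  · exact he a (by omega) (by omega)

/-- No shadow byte is written by a store below the shadow region. -/
theorem untouched_write {m m' : Mem} (h : ShadowUntouched m m') (w : Word) (k x : Nat) (hw : w.toNat + k ≤ 0xC00000) :
    ShadowUntouched m (m'.writeLE w k x) := by
  intro a h1 h2
  have e := Mem.eqOn_writeLE m' w k x 0xC00000 0x200000 (by omega) (Or.inr hw)
  exact (e a h1 (by omega)).trans (h a h1 h2)

/-- **SD.ERR at exit 4 of segment `.9`** (0x114427: `codebook_count` stored, `setup_malloc` returned NULL and NULL was stored to
`codebooks`): neither `SD 2` (its zero rest starts at `codebook_count`) nor `SD 3` (CB0 non-NULL) holds there, so `Failed` is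
built from its parts — H4 from `codebooks = NULL`, H2 / H3 / H5 from the zero rest from `floor_count` on, H1 from CM2. -/
theorem failed_null {g : Ghost} {A : Arena × List Obj} {mem : Mem} (henv : Env (g.Blk A) (g.Live A) mem)
    (hbits : Bits (g.Blk A) g.len mem g.f) (harena : ArenaOK A.1 A.2 mem g.f) (hcm : CommentsOK (g.Blk A) mem g.f)
    (hr : RestZero mem g.f Off.stb_vorbis.floor_count) (hnull : stb_vorbis.codebooks mem g.f = 0) :
    Failed g.len g.f (g.Live A) A mem := by
  have h176r : Off.stb_vorbis.floor_count ≤ Off.stb_vorbis.residue_count := by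
    simp only [voff]
    decide
  have h176m : Off.stb_vorbis.floor_count ≤ Off.stb_vorbis.mapping_count := by
    simp only [voff]
    decide
  refine ⟨⟨henv, ⟨Bits.ob1 hbits, ArenaOK.alloc_buffer_ne_zero harena, hcm.h1, ?_, ?_, H4.of_null hnull, ?_⟩, hbits⟩,
    harena.AR1, ?_⟩
  · exact H2.of_null (hr.residue_null h176r).1
  · exact H3.of_null (hr.residue_null h176r).1
  · exact H5.of_null (hr.mapping_null h176m)
  · intro o ho
    apply harena.AR6 o
    unfold Arena.objs
    exact List.mem_append_left _ ho


end P1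
end Vorbis.Spec.StartDecoder
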